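-- pv_equiv track=rewrite | github.com/flpnascto/restaurant-orders | src/analyze_log.py | get_days_never_visited_per_costumer
-- ===== SOURCE A (Python) =====
-- def get_days_never_visited_per_costumer(log, customer):
--     weekdays = set()
--     customer_weekdays = set()
--     for item in log:
--         weekdays.add(item["weekday"])
--         if item["customer"] == customer:
--             customer_weekdays.add(item["weekday"])
--     return weekdays.difference(customer_weekdays)
-- ===== SOURCE B (Python) =====
-- def get_days_never_visited_per_costumer(log, customer):
--     index = {}
--     for item in log:
--         index.setdefault(item["weekday"], set()).add(item["customer"])
--     return {wd for wd, custs in index.items() if customer not in custs}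
-- ===== Notes on version B (the rewrite author's own statement) =====
-- stated objective: alternative
-- what changed: Replaces the two parallel sets + set.difference strategy by a one-pass dict index weekday -> set of customers seen that day, followed by a second pass over the index collecting the weekdays whose customer set misses the given customer; Pre_ excludes log entries missing the 'weekday'/'customer' keys, where both programs raise KeyError.
import Mathlib
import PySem

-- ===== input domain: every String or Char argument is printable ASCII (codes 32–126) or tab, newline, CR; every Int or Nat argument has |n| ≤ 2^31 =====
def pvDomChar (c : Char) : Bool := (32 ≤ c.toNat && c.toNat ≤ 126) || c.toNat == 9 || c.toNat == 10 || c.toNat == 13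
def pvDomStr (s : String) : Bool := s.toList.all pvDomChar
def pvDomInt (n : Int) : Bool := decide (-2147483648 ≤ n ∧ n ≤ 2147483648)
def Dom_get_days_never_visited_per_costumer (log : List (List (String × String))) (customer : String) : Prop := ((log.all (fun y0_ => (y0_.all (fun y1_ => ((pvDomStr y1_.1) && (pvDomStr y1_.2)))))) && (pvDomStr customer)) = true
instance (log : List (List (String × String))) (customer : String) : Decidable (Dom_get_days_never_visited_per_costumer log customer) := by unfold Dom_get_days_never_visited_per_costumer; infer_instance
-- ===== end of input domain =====

-- B replaces A's two parallel sets + set.difference by a dict index (weekday -> set of customers)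
-- built in one pass and filtered in a second pass; same cost, different decomposition.


-- shared helper: item["k"] on the association-list dict (first match); the "" default is
-- unreachable under Pre_, which guarantees the key is present (Python raises KeyError otherwise)
def pvLookup (item : List (String × String)) (k : String) : String :=
  ((PySem.Dict.mk item).get? k).getD ""

-- ===== PORT A =====
def get_days_never_visited_per_costumer (log : List (List (String × String))) (customer : String) : List String :=
  let st := log.foldl
    (fun (st : PySem.Set String × PySem.Set String) item =>
      (PySem.Set.add st.1 (pvLookup item "weekday"),
       if pvLookup item "customer" == customer then PySem.Set.add st.2 (pvLookup item "weekday") else st.2))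
    (PySem.Set.empty, PySem.Set.empty)
  PySem.Set.diff st.1 st.2

-- ===== PORT B =====
def get_days_never_visited_per_costumer_alt (log : List (List (String × String))) (customer : String) : List String :=
  let index := log.foldl
    (fun (d : PySem.Dict String (PySem.Set String)) item =>
      d.modify (pvLookup item "weekday") PySem.Set.empty (fun s => PySem.Set.add s (pvLookup item "customer")))
    PySem.Dict.empty
  index.items.foldl
    (fun (acc : PySem.Set String) p =>
      if PySem.Set.contains p.2 customer then acc else PySem.Set.add acc p.1)
    PySem.Set.empty

-- ===== PRECONDITION & SPEC =====
-- Pre_ excludes exactly the inputs where the Python raises KeyError: a log entry without a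
-- "weekday" or "customer" key (both A and B subscript both keys on every entry).
def Pre_get_days_never_visited_per_costumer (log : List (List (String × String))) (customer : String) : Prop :=
  (log.all (fun item => (PySem.Dict.mk item).contains "weekday" && (PySem.Dict.mk item).contains "customer")) = true
instance (log : List (List (String × String))) (customer : String) : Decidable (Pre_get_days_never_visited_per_costumer log customer) := by unfold Pre_get_days_never_visited_per_costumer; infer_instance
def pvWitness_get_days_never_visited_per_costumer : (List (List (String × String))) × String :=
  ([[("weekday", "Mon"), ("customer", "bob")], [("weekday", "Tue"), ("customer", "ana")]], "ana")

def Spec_get_days_never_visited_per_costumer (log : List (List (String × String))) (customer : String) (out : List String) : Prop := out = get_days_never_visited_per_costumer_alt log customer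
instance (log : List (List (String × String))) (customer : String) (out : List String) : Decidable (Spec_get_days_never_visited_per_costumer log customer out) := by unfold Spec_get_days_never_visited_per_costumer; infer_instance

-- ===== CLAIM (what is proved, stated in full; the proofs are below) =====
def Claim_equal_get_days_never_visited_per_costumer : Prop := ∀ (log : List (List (String × String))) (customer : String), Dom_get_days_never_visited_per_costumer log customer → Pre_get_days_never_visited_per_costumer log customer → Spec_get_days_never_visited_per_costumer log customer (get_days_never_visited_per_costumer log customer)

-- ===== LEMMAS AND PROOFS =====

-- A's loop, first component: just the fold of weekday-adds
lemma A_fold_fst (customer : String) :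
    ∀ (log : List (List (String × String))) (W C : PySem.Set String),
      (log.foldl
        (fun (st : PySem.Set String × PySem.Set String) item =>
          (PySem.Set.add st.1 (pvLookup item "weekday"),
           if pvLookup item "customer" == customer then PySem.Set.add st.2 (pvLookup item "weekday") else st.2))
        (W, C)).1
      = log.foldl (fun s item => PySem.Set.add s (pvLookup item "weekday")) W := by
  intro log
  induction log with
  | nil => intro W C; rfl
  | cons i t ih => intro W C; simp only [List.foldl_cons]; exact ih _ _

-- A's loop, second component: membership characterisation
lemma A_fold_snd_mem (customer x : String) :
    ∀ (log : List (List (String × String))) (W C : PySem.Set String),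
      (x ∈ (log.foldl
        (fun (st : PySem.Set String × PySem.Set String) item =>
          (PySem.Set.add st.1 (pvLookup item "weekday"),
           if pvLookup item "customer" == customer then PySem.Set.add st.2 (pvLookup item "weekday") else st.2))
        (W, C)).2)
      ↔ x ∈ C ∨ ∃ item ∈ log, pvLookup item "customer" = customer ∧ pvLookup item "weekday" = x := by
  intro log
  induction log with
  | nil => intro W C; simp
  | cons i t ih =>
    intro W C
    simp only [List.foldl_cons]
    by_cases h : pvLookup i "customer" = customer
    · simp only [h, BEq.rfl, if_true, ih, PySem.Set.mem_add, List.mem_cons]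
      constructor
      · rintro (( hC | hx) | he)
        · exact Or.inl hC
        · exact Or.inr ⟨i, Or.inl rfl, h, hx.symm⟩
        · obtain ⟨it, hit, h1, h2⟩ := he; exact Or.inr ⟨it, Or.inr hit, h1, h2⟩
      · rintro (hC | ⟨it, (rfl | hit), h1, h2⟩)
        · exact Or.inl (Or.inl hC)
        · exact Or.inl (Or.inr h2.symm)
        · exact Or.inr ⟨it, hit, h1, h2⟩
    · have hb : (pvLookup i "customer" == customer) = false := by
        simpa using h
      simp only [hb, ih, List.mem_cons]
      constructor
      · rintro (hC | ⟨it, hit, h1, h2⟩)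
        · exact Or.inl hC
        · exact Or.inr ⟨it, Or.inr hit, h1, h2⟩
      · rintro (hC | ⟨it, (rfl | hit), h1, h2⟩)
        · exact Or.inl hC
        · exact absurd h1 h
        · exact Or.inr ⟨it, hit, h1, h2⟩

-- B's index: who is recorded under a weekday
lemma B_getD_mem (customer wd : String) :
    ∀ (log : List (List (String × String))) (d : PySem.Dict String (PySem.Set String)),
      (customer ∈ (log.foldl
        (fun (d : PySem.Dict String (PySem.Set String)) item =>
          d.modify (pvLookup item "weekday") PySem.Set.empty (fun s => PySem.Set.add s (pvLookup item "customer")))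
        d).getD wd PySem.Set.empty)
      ↔ customer ∈ d.getD wd PySem.Set.empty
        ∨ ∃ item ∈ log, pvLookup item "weekday" = wd ∧ pvLookup item "customer" = customer := by
  intro log
  induction log with
  | nil => intro d; simp
  | cons i t ih =>
    intro d
    simp only [List.foldl_cons, ih, PySem.Dict.getD_modify, List.mem_cons]
    by_cases h : wd = pvLookup i "weekday"
    · rw [if_pos h]
      subst h
      simp only [PySem.Set.mem_add]
      constructor
      · rintro ((hd | hc) | he)
        · exact Or.inl hd
        · exact Or.inr ⟨i, Or.inl rfl, rfl, hc.symm⟩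
        · obtain ⟨it, hit, h1, h2⟩ := he; exact Or.inr ⟨it, Or.inr hit, h1, h2⟩
      · rintro (hd | ⟨it, (rfl | hit), h1, h2⟩)
        · exact Or.inl (Or.inl hd)
        · exact Or.inl (Or.inr h2.symm)
        · exact Or.inr ⟨it, hit, h1, h2⟩
    · rw [if_neg h]
      constructor
      · rintro (hd | ⟨it, hit, h1, h2⟩)
        · exact Or.inl hd
        · exact Or.inr ⟨it, Or.inr hit, h1, h2⟩
      · rintro (hd | ⟨it, (rfl | hit), h1, h2⟩)
        · exact Or.inl hd
        · exact absurd h1.symm h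
        · exact Or.inr ⟨it, hit, h1, h2⟩

-- B's second pass over pairs with distinct, fresh keys appends the kept keys in order
lemma B_collect (customer : String) :
    ∀ (l : List (String × PySem.Set String)) (acc : PySem.Set String),
      (∀ p ∈ l, p.1 ∉ acc) → (l.map (·.1)).Nodup →
      l.foldl
        (fun (acc : PySem.Set String) p =>
          if PySem.Set.contains p.2 customer then acc else PySem.Set.add acc p.1)
        acc
      = acc ++ (l.filter (fun p => !(PySem.Set.contains p.2 customer))).map (·.1) := by
  intro l
  induction l with
  | nil => intro acc _ _; simp
  | cons p t ih =>
    intro acc hfresh hnd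
    simp only [List.map_cons, List.nodup_cons] at hnd
    simp only [List.foldl_cons]
    by_cases h : PySem.Set.contains p.2 customer
    · rw [if_pos h, ih acc (fun q hq => hfresh q (List.mem_cons_of_mem _ hq)) hnd.2]
      have hm : customer ∈ p.2 := (PySem.Set.contains_iff _ _).mp h
      simp [hm]
    · rw [if_neg h, PySem.Set.add_of_not_mem (hfresh p (List.mem_cons_self ..))]
      have hm : customer ∉ p.2 := fun hc => h ((PySem.Set.contains_iff _ _).mpr hc)
      rw [ih (acc ++ [p.1]) ?_ hnd.2]
      · simp [hm]
      · intro q hq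
        simp only [List.mem_append, List.mem_singleton]
        rintro (hqa | hqp)
        · exact hfresh q (List.mem_cons_of_mem _ hq) hqa
        · exact hnd.1 (hqp ▸ List.mem_map_of_mem hq)

-- ===== VERDICT (by name: the statement is the Claim_ definition above) =====
theorem get_days_never_visited_per_costumer_spec : Claim_equal_get_days_never_visited_per_costumer := by
  intro log customer _ _
  unfold Spec_get_days_never_visited_per_costumer
  unfold get_days_never_visited_per_costumer get_days_never_visited_per_costumer_alt
  simp only []
  set d := log.foldl
    (fun (d : PySem.Dict String (PySem.Set String)) item =>
      d.modify (pvLookup item "weekday") PySem.Set.empty (fun s => PySem.Set.add s (pvLookup item "customer")))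
    PySem.Dict.empty with hd
  set st := log.foldl
    (fun (st : PySem.Set String × PySem.Set String) item =>
      (PySem.Set.add st.1 (pvLookup item "weekday"),
       if pvLookup item "customer" == customer then PySem.Set.add st.2 (pvLookup item "weekday") else st.2))
    (PySem.Set.empty, PySem.Set.empty) with hst
  have hnodup : d.keys.Nodup := by
    rw [hd]
    exact PySem.Dict.nodup_keys_foldl_modify_key _ _ _ _ _ PySem.Dict.nodup_keys_empty
  -- B's second pass collects the kept keys of the index, in key order
  have hB : d.items.foldl
      (fun (acc : PySem.Set String) p =>
        if PySem.Set.contains p.2 customer then acc else PySem.Set.add acc p.1)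
      PySem.Set.empty
      = (d.items.filter (fun p => !(PySem.Set.contains p.2 customer))).map (·.1) := by
    have := B_collect customer d.items PySem.Set.empty
      (by intro p _ hmem; simp [PySem.Set.empty] at hmem)
      (by simpa only [PySem.Dict.keys] using hnodup)
    simpa [PySem.Set.empty] using this
  rw [hB]
  -- rewrite B's filter over items as a filter over keys
  have hitems : d.items.filter (fun p => !(PySem.Set.contains p.2 customer))
      = d.items.filter (fun p => !(PySem.Set.contains (d.getD p.1 PySem.Set.empty) customer)) := by
    apply List.filter_congr
    intro p hp
    have : d.getD p.1 PySem.Set.empty = p.2 :=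
      PySem.Dict.getD_of_mem_items d (by simpa using hp) hnodup _
    rw [this]
  rw [hitems]
  have hmapfilter : (d.items.filter (fun p => !(PySem.Set.contains (d.getD p.1 PySem.Set.empty) customer))).map (·.1)
      = d.keys.filter (fun x => !(PySem.Set.contains (d.getD x PySem.Set.empty) customer)) := by
    simp only [PySem.Dict.keys]
    rw [List.filter_map]
    rfl
  rw [hmapfilter]
  -- A's first set equals the index's key list
  have hW : st.1 = d.keys := by
    rw [hst, A_fold_fst, hd, PySem.Dict.keys_foldl_modify_key, PySem.Dict.keys_empty,
      PySem.Set.update, List.foldl_map]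
    rfl
  -- pointwise: x was a weekday of `customer` iff `customer` is in the index's set for x
  have hpt : ∀ x : String, (!(PySem.Set.contains st.2 x)) = (!(PySem.Set.contains (d.getD x PySem.Set.empty) customer)) := by
    intro x
    have h1 : x ∈ st.2 ↔ ∃ item ∈ log, pvLookup item "customer" = customer ∧ pvLookup item "weekday" = x := by
      rw [hst, A_fold_snd_mem]
      simp [PySem.Set.empty]
    have h2 : customer ∈ d.getD x PySem.Set.empty ↔ ∃ item ∈ log, pvLookup item "weekday" = x ∧ pvLookup item "customer" = customer := by
      rw [hd, B_getD_mem]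
      simp [PySem.Set.empty, PySem.Dict.getD_empty]
    congr 1
    rw [Bool.eq_iff_iff]
    simp only [PySem.Set.contains_iff]
    rw [h1, h2]
    constructor
    · rintro ⟨it, hit, ha, hb⟩; exact ⟨it, hit, hb, ha⟩
    · rintro ⟨it, hit, ha, hb⟩; exact ⟨it, hit, hb, ha⟩
  show PySem.Set.diff st.1 st.2 = _
  rw [PySem.Set.diff, hW]
  exact List.filter_congr (fun x _ => hpt x)
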